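-- pv_equiv track=rewrite | github.com/DignityMcPwnr/XiCrypt | XiCrypt/engine.py | rotorassembly
-- ===== SOURCE A (Python) =====
-- def rotorassembly(table, Posrotor):
--     I=0
--     X=1
--     tablelength = len(table)-1
--     startletter = table[Posrotor]
--     eindletter = table[tablelength]
--     while startletter != str(table[0]):
--         table[(tablelength-I)]= table[(tablelength-X)]
--         if X == tablelength:
--             I = 0
--             X = 1
--             table[0] = eindletter
--             eindletter = table[tablelength]
--         else:
--             I += 1
--             X += 1
--     return table
-- ===== SOURCE B (Python) =====
-- def rotorassembly(table, Posrotor):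
--     # One scan to find the rotation offset, then one slice-based rotation (O(n)).
--     # Note: A mutates `table` in place; B builds a new list -- equivalence is about the return value.
--     start = table[Posrotor]
--     n = len(table)
--     k = next(i for i in range(n) if table[-i % n] == start)
--     return table[n - k:] + table[:n - k]
-- ===== Notes on version B (the rewrite author's own statement) =====
-- stated objective: faster
-- what changed: Instead of repeatedly right-rotating the list one element at a time until the chosen letter reaches the front, B finds the needed rotation offset with a single scan and performs one slice-based rotation.
import Mathlib
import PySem

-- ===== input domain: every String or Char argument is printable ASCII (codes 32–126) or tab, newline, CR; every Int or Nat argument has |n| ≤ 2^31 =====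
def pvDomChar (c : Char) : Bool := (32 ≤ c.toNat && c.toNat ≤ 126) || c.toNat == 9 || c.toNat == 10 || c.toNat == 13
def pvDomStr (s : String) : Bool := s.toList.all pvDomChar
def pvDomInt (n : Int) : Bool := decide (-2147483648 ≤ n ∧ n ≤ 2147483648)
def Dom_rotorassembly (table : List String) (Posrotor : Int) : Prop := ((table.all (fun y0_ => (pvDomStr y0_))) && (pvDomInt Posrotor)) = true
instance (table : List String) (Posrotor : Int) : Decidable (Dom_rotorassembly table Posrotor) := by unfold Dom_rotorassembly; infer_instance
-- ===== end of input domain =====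

-- B replaces A's element-by-element repeated right rotation with one scan for the rotation offset
-- and a single slice-based rotation; A mutates `table` in place, B builds a new list — the
-- equivalence proved here is about the return value.

-- ===== PORT A =====
-- One full pass of A's while loop: the body runs for X = 1..tablelength with I = X-1 throughout
-- (the assignments table[tablelength-I] = table[tablelength-X]); the loop condition
-- `startletter != str(table[0])` cannot change mid-pass because table[0] is only written at the
-- wrap step (X == tablelength), so the port checks it once per pass and replays the pass's
-- assignments as a fold over X.  str() applied to a string is the identity.  pySetD/pyGetD are the
-- total forms of table[i] = … / table[i]; exact here since the indices are in range on every input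
-- on which the Python loop runs (under Pre_ below).
def rotorPass (tl : Int) (t : List String) : List String :=
  (PySem.List.pyRange 1 (tl + 1) 1).foldl
    (fun s X => PySem.List.pySetD s (tl - (X - 1)) (PySem.List.pyGetD s (tl - X) "")) t

-- The while loop; the Nat fuel (table.length passes) only totalises it: under Pre_ the loop
-- exits before the fuel runs out (proved below).  State: the current table and eindletter.
def rotorLoop (startletter : String) (tl : Int) : Nat → List String → String → List String
  | 0, t, _ => t
  | fuel + 1, t, eindletter =>
    if startletter ≠ PySem.List.pyGetD t 0 "" then
      let t1 := PySem.List.pySetD (rotorPass tl t) 0 eindletter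
      rotorLoop startletter tl fuel t1 (PySem.List.pyGetD t1 tl "")
    else t

def rotorassembly (table : List String) (Posrotor : Int) : List String :=
  let tablelength : Int := (table.length : Int) - 1
  let startletter := PySem.List.pyGetD table Posrotor ""
  let eindletter := PySem.List.pyGetD table tablelength ""
  rotorLoop startletter tablelength table.length table eindletter

-- ===== PORT B =====
def rotorassembly_alt (table : List String) (Posrotor : Int) : List String :=
  let start := PySem.List.pyGetD table Posrotor ""
  let n : Int := (table.length : Int)
  -- next(i for i in range(n) if table[-i % n] == start); `.getD 0` only totalises the
  -- StopIteration case, which cannot occur under Pre_ (some offset always matches).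
  let k : Int := ((PySem.List.pyRange 0 n 1).find? (fun i =>
      PySem.List.pyGetD table (PySem.Int.mod (-i) n) "" == start)).getD 0
  PySem.List.slice table (some (n - k)) none ++ PySem.List.slice table none (some (n - k))

-- ===== PRECONDITION & SPEC =====
-- A raises IndexError on table[Posrotor] when the index is out of range (incl. the empty table).
def Pre_rotorassembly (table : List String) (Posrotor : Int) : Prop :=
  PySem.Raise.InRange table.length Posrotor
instance (table : List String) (Posrotor : Int) : Decidable (Pre_rotorassembly table Posrotor) := by
  unfold Pre_rotorassembly; infer_instance

def pvWitness_rotorassembly : List String × Int := (["a", "b", "c"], 1)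

def Spec_rotorassembly (table : List String) (Posrotor : Int) (out : List String) : Prop :=
  out = rotorassembly_alt table Posrotor
instance (table : List String) (Posrotor : Int) (out : List String) : Decidable (Spec_rotorassembly table Posrotor out) := by
  unfold Spec_rotorassembly; infer_instance

-- ===== CLAIM (what is proved, stated in full; the proofs are below) =====
def Claim_equal_rotorassembly : Prop := ∀ (table : List String) (Posrotor : Int), Dom_rotorassembly table Posrotor → Pre_rotorassembly table Posrotor → Spec_rotorassembly table Posrotor (rotorassembly table Posrotor)

-- ===== LEMMAS AND PROOFS =====

-- Right rotation of `l` by k places (0 ≤ k ≤ l.length): the last k elements move to the front.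
def rotN (l : List String) (k : Nat) : List String :=
  l.drop (l.length - k) ++ l.take (l.length - k)

-- The per-pass specification of A's loop: rotate right by one until the head equals `start`.
def specLoop (start : String) : Nat → List String → List String
  | 0, t => t
  | fuel + 1, t =>
    if start ≠ t.getD 0 "" then
      specLoop start fuel (t.getD (t.length - 1) "" :: t.dropLast)
    else t

lemma shift_foldl (t : List String) (m : Nat) (ht : t.length = m + 1) (j : Nat) (hj : j ≤ m) :
    (List.range j).foldl
      (fun s (k : Nat) => PySem.List.pySetD s ((m : Int) - (k : Int)) (PySem.List.pyGetD s ((m : Int) - (k : Int) - 1) "")) t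
    = t.take (m - j + 1) ++ (t.drop (m - j)).take j := by
  induction j with
  | zero =>
    simp [List.take_of_length_le (le_of_eq ht)]
  | succ j ih =>
    rw [List.range_succ, List.foldl_append, ih (by omega)]
    simp only [List.foldl_cons, List.foldl_nil]
    set F := t.take (m - j + 1) ++ (t.drop (m - j)).take j with hF
    have hFlen : F.length = m + 1 := by
      simp [hF]; omega
    have hidx1 : ((m : Int) - (j : Int) - 1) = ((m - j - 1 : Nat) : Int) := by omega
    have hidx2 : ((m : Int) - (j : Int)) = ((m - j : Nat) : Int) := by omega
    rw [hidx1, hidx2, PySem.List.pyGetD_natCast, PySem.List.pySetD_natCast]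
    have hval : F.getD (m - j - 1) "" = t[m - j - 1]'(by omega) := by
      rw [List.getD_eq_getElem?_getD, List.getElem?_eq_getElem (by omega)]
      simp only [Option.getD_some, hF]
      rw [List.getElem_append_left (by simp; omega)]
      rw [List.getElem_take]
    rw [hval]
    apply List.ext_getElem
    · simp; omega
    · intro i h1 h2
      simp only [List.getElem_set, List.getElem_append, List.getElem_take, List.getElem_drop, hF,
        List.length_take]
      split_ifs <;> first | rfl | omega | (congr 1; omega)

lemma pass_eq (t : List String) (m : Nat) (ht : t.length = m + 1) (e : String) :
    PySem.List.pySetD (rotorPass (m : Int) t) 0 e = e :: t.dropLast := by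
  have h0 : rotorPass (m : Int) t = t.take 1 ++ t.take m := by
    unfold rotorPass
    rw [PySem.List.pyRange_one, show ((m : Int) + 1 - 1).toNat = m by omega]
    rw [List.foldl_map]
    have hfun : (fun (s : List String) (k : Nat) =>
        PySem.List.pySetD s ((m:Int) - ((1 + (k:Int)) - 1)) (PySem.List.pyGetD s ((m:Int) - (1 + (k:Int))) ""))
      = (fun (s : List String) (k : Nat) =>
        PySem.List.pySetD s ((m : Int) - (k : Int)) (PySem.List.pyGetD s ((m : Int) - (k : Int) - 1) "")) := by
      funext s k
      congr 1
      · ring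
      · congr 1; ring
    rw [hfun, shift_foldl t m ht m le_rfl]
    simp
  rw [h0]
  rcases t with _ | ⟨a, t'⟩
  · simp at ht
  · simp only [List.take_succ_cons, List.take_zero, List.cons_append, List.nil_append]
    rw [show (0:Int) = ((0:Nat):Int) from rfl, PySem.List.pySetD_natCast]
    simp only [List.set_cons_zero]
    congr 1
    rw [List.dropLast_eq_take]
    simp at ht ⊢
    omega

lemma loop_eq (start : String) (m : Nat) :
    ∀ (fuel : Nat) (t : List String), t.length = m + 1 →
      rotorLoop start (m : Int) fuel t (t.getD m "") = specLoop start fuel t := by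
  intro fuel
  induction fuel with
  | zero => intro t ht; rfl
  | succ f ih =>
    intro t ht
    rw [rotorLoop, specLoop, PySem.List.pyGetD_zero]
    by_cases hc : start ≠ t.getD 0 ""
    · rw [if_pos hc, if_pos hc]
      have ht1 : PySem.List.pySetD (rotorPass (m : Int) t) 0 (t.getD m "") = t.getD m "" :: t.dropLast :=
        pass_eq t m ht _
      have hlen1 : (t.getD m "" :: t.dropLast).length = m + 1 := by simp; omega
      simp only [ht1]
      rw [show t.getD (t.length - 1) "" = t.getD m "" by rw [ht]; norm_num]
      rw [PySem.List.pyGetD_natCast]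
      exact ih _ hlen1
    · rw [if_neg hc, if_neg hc]

lemma rotN_zero (l : List String) : rotN l 0 = l := by
  simp [rotN]

lemma rotN_getD_zero (l : List String) (j : Nat) (hl : l ≠ []) (hj : j ≤ l.length) :
    (rotN l j).getD 0 "" = l.getD ((l.length - j) % l.length) "" := by
  unfold rotN
  have hn : 0 < l.length := List.length_pos_iff.mpr hl
  rcases Nat.eq_zero_or_pos j with h | h
  · subst h; simp
  · rcases Nat.lt_or_ge j l.length with h2 | h2
    · have hlt : l.length - j < l.length := by omega
      rw [Nat.mod_eq_of_lt hlt]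
      rw [List.getD_eq_getElem?_getD, List.getD_eq_getElem?_getD,
          List.getElem?_append_left (by simp; omega)]
      simp [List.getElem?_drop]
    · have hj' : j = l.length := by omega
      subst hj'; simp

lemma rotN_step (l : List String) (j : Nat) (hj : j < l.length) :
    (rotN l j).getD ((rotN l j).length - 1) "" :: (rotN l j).dropLast = rotN l (j + 1) := by
  have hlen : (rotN l j).length = l.length := by simp [rotN]
  have hm : l.length - j - 1 < l.length := by omega
  have htake : l.take (l.length - j) ≠ [] := by
    have : (l.take (l.length - j)).length = l.length - j := by simp
    intro h; rw [h] at this; simp at this; omega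
  have hlast : (rotN l j).getD ((rotN l j).length - 1) "" = l[l.length - j - 1]'hm := by
    rw [hlen, List.getD_eq_getElem?_getD]
    rw [show (rotN l j)[l.length - 1]? = some (l[l.length - j - 1]'hm) from ?_]
    · simp
    · unfold rotN
      rw [List.getElem?_append_right (by simp; omega)]
      simp only [List.length_drop]
      rw [List.getElem?_take_of_lt (by omega)]
      rw [List.getElem?_eq_getElem (by omega)]
      congr 1
      congr 1
      omega
  have hdrop : (rotN l j).dropLast = l.drop (l.length - j) ++ l.take (l.length - j - 1) := by
    unfold rotN
    rw [List.dropLast_append_of_ne_nil htake]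
    congr 1
    rw [List.dropLast_eq_take, List.take_take]
    congr 1
    simp
  rw [hlast, hdrop]
  unfold rotN
  have : l.drop (l.length - (j+1)) = l[l.length - j - 1]'hm :: l.drop (l.length - j) := by
    rw [show l.length - (j+1) = l.length - j - 1 by omega]
    rw [List.drop_eq_getElem_cons hm]
    congr 2; omega
  rw [this]
  simp
  omega

lemma specLoop_rot (l : List String) (start : String) (k : Nat) (hk : k < l.length)
    (hP : l.getD ((l.length - k) % l.length) "" = start)
    (hmin : ∀ j, j < k → l.getD ((l.length - j) % l.length) "" ≠ start) :
    ∀ (fuel j : Nat), j ≤ k → k - j < fuel → specLoop start fuel (rotN l j) = rotN l k := by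
  have hl : l ≠ [] := by intro h; subst h; simp at hk
  intro fuel
  induction fuel with
  | zero => intro j h1 h2; omega
  | succ f ih =>
    intro j h1 h2
    rcases Nat.eq_or_lt_of_le h1 with he | hlt
    · subst he
      rw [specLoop, if_neg]
      simp only [ne_eq, Decidable.not_not]
      rw [rotN_getD_zero l j hl (by omega), hP]
    · rw [specLoop, if_pos, rotN_step l j (by omega)]
      · exact ih (j+1) (by omega) (by omega)
      · rw [rotN_getD_zero l j hl (by omega)]
        exact fun h => hmin j hlt h.symm

lemma find?_range_eq {p : Nat → Bool} (n k : Nat) (hk : k < n)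
    (hmin : ∀ j, j < k → p j = false) (hp : p k = true) :
    (List.range n).find? p = some k := by
  have hdecomp : List.range n = List.range (k+1) ++ (List.range (n - (k+1))).map (k+1+·) := by
    rw [← List.range_add]; congr 1; omega
  rw [hdecomp, List.find?_append, List.range_succ, List.find?_append]
  have h1 : (List.range k).find? p = none := by
    rw [List.find?_eq_none]
    intro x hx; simp [List.mem_range] at hx; simp [hmin x hx]
  simp [h1, hp]

lemma mod_neg_translate (n j : Nat) (hn : 0 < n) (hj : j < n) :
    PySem.Int.mod (-(j : Int)) (n : Int) = ((n - j) % n : Nat) := by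
  rw [PySem.Int.mod_eq_emod_of_pos (by exact_mod_cast hn)]
  rcases Nat.eq_zero_or_pos j with h | h
  · subst h; simp
  · have h1 : (-(j:Int)) % (n:Int) = (-(j:Int) + n) % (n:Int) := (Int.add_emod_right _ _).symm
    rw [h1, Int.emod_eq_of_lt (by omega) (by omega)]
    have : ((n - j) % n : Nat) = n - j := Nat.mod_eq_of_lt (by omega)
    rw [this]; omega

-- ===== VERDICT (by name: the statement is the Claim_ definition above) =====
lemma pre_bounds (l : List String) (p : Int) (h : PySem.Raise.InRange l.length p) :
    -(l.length : Int) ≤ p ∧ p < l.length := by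
  simpa [PySem.Raise.InRange] using h

theorem rotorassembly_spec : Claim_equal_rotorassembly := by
  intro l p _ hpre
  unfold Spec_rotorassembly
  have hb := pre_bounds l p hpre
  have hn1 : 1 ≤ l.length := by omega
  set n := l.length with hn
  set start := PySem.List.pyGetD l p "" with hstart
  -- the index A reads start from, normalised to a Nat
  obtain ⟨p', hp'lt, hp'⟩ : ∃ p', p' < n ∧ l.getD p' "" = start := by
    by_cases hp0 : 0 ≤ p
    · refine ⟨p.toNat, by omega, ?_⟩
      rw [hstart, show p = ((p.toNat : Nat) : Int) by omega, PySem.List.pyGetD_natCast,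
          Int.toNat_natCast]
    · refine ⟨((p : Int) + n).toNat, by omega, ?_⟩
      rw [hstart, show p = -(((-p).toNat : Nat) : Int) by omega]
      rw [PySem.List.pyGetD_neg_natCast _ _ _ (by omega) (by omega)]
      rw [List.getD_eq_getElem l "" (by omega)]
      congr 1
      omega
  -- there is an offset whose rotation puts `start` in front
  have hE : ∃ i, i < n ∧ l.getD ((n - i) % n) "" = start := by
    refine ⟨(n - p') % n, Nat.mod_lt _ (by omega), ?_⟩
    rcases Nat.eq_zero_or_pos p' with h0 | h0
    · subst h0
      rw [Nat.sub_zero, Nat.mod_self, Nat.sub_zero, Nat.mod_self]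
      simpa using hp'
    · have h1 : (n - p') % n = n - p' := Nat.mod_eq_of_lt (by omega)
      rw [h1, show n - (n - p') = p' by omega, Nat.mod_eq_of_lt (by omega)]
      exact hp'
  set k := Nat.find hE with hkdef
  have hkspec := Nat.find_spec hE
  have hkn : k < n := hkspec.1
  have hPk : l.getD ((n - k) % n) "" = start := hkspec.2
  have hmink : ∀ j, j < k → l.getD ((n - j) % n) "" ≠ start := by
    intro j hj hcontra
    rcases Nat.lt_or_ge j n with hjn | hjn
    · exact Nat.find_min hE hj ⟨hjn, hcontra⟩
    · omega
  -- A computes the k-fold rotation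
  have hA : rotorassembly l p = rotN l k := by
    unfold rotorassembly
    dsimp only
    rw [show ((l.length : Int) - 1) = (((n - 1 : Nat) : Nat) : Int) by omega]
    rw [PySem.List.pyGetD_natCast]
    rw [show l.length = n from hn.symm]
    rw [loop_eq start (n - 1) n l (by omega)]
    have hrot := specLoop_rot l start k hkn hPk hmink n 0 (by omega) (by omega)
    rw [rotN_zero] at hrot
    exact hrot
  -- B computes the k-fold rotation
  have hB : rotorassembly_alt l p = rotN l k := by
    unfold rotorassembly_alt
    dsimp only
    rw [PySem.List.pyRange_one, show ((l.length : Int) - 0).toNat = n by omega]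
    rw [List.find?_map]
    rw [find?_range_eq n k hkn ?_ ?_]
    · simp only [Option.map_some, Option.getD_some]
      rw [show (0 : Int) + (k : Int) = (k : Int) by ring]
      rw [show ((l.length : Int) - (k : Int)) = ((n - k : Nat) : Int) by omega]
      rw [PySem.List.slice_from_natCast, PySem.List.slice_to_natCast]
      rfl
    · intro j hj
      simp only [Function.comp]
      rw [show (0 : Int) + (j : Int) = (j : Int) by ring]
      rw [mod_neg_translate n j (by omega) (by omega), PySem.List.pyGetD_natCast]
      simpa using hmink j hj
    · simp only [Function.comp]
      rw [show (0 : Int) + (k : Int) = (k : Int) by ring]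
      rw [mod_neg_translate n k (by omega) (by omega), PySem.List.pyGetD_natCast]
      simpa using hPk
  rw [hA, hB]
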